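-- pv_equiv track=rewrite | github.com/SimeonChifligarov/Alpha_Judge_Softuni | Python_Fundamentals/Python_Fundamentals/08_03_Text_Processing_More_Exercises/02_ASCII_Sumator_v2.py | sum_ascii_between_chars
-- ===== SOURCE A (Python) =====
-- def sum_ascii_between_chars(start_char: str, end_char: str, text: str) -> int:
--     """
--     Calculates the sum of ASCII values of all characters in 'text' that are between
--     'start_char' and 'end_char' in the ASCII table.
--
--     :param start_char: The starting character.
--     :param end_char: The ending character.
--     :param text: The input string to process.
--     :return: The sum of ASCII values of the characters within the given range.
--     """
--     start_ascii = ord(start_char)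
--     end_ascii = ord(end_char)
--
--     ascii_sum = 0
--     for char in text:
--         char_ascii = ord(char)
--         if start_ascii < char_ascii < end_ascii:
--             ascii_sum += char_ascii
--
--     return ascii_sum
-- ===== SOURCE B (Python) =====
-- def sum_ascii_between_chars(start_char: str, end_char: str, text: str) -> int:
--     """Loop over the ASCII codes strictly inside the range, multiplying each code
--     by how often its character occurs in text (one frequency pass first)."""
--     start_ascii = ord(start_char)
--     end_ascii = ord(end_char)
--     counts = {}
--     for ch in text:
--         counts[ch] = counts.get(ch, 0) + 1
--     total = 0
--     for code in range(start_ascii + 1, end_ascii):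
--         total += code * counts.get(chr(code), 0)
--     return total
-- ===== Notes on version B (the rewrite author's own statement) =====
-- stated objective: alternative
-- what changed: B's main loop iterates over the integer ASCII codes strictly between the bounds (range(start+1, end)) and adds code * frequency-of-chr(code), using a character-frequency dict built in one preliminary pass, instead of A's single loop that tests and adds every character of the text.
import Mathlib
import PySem

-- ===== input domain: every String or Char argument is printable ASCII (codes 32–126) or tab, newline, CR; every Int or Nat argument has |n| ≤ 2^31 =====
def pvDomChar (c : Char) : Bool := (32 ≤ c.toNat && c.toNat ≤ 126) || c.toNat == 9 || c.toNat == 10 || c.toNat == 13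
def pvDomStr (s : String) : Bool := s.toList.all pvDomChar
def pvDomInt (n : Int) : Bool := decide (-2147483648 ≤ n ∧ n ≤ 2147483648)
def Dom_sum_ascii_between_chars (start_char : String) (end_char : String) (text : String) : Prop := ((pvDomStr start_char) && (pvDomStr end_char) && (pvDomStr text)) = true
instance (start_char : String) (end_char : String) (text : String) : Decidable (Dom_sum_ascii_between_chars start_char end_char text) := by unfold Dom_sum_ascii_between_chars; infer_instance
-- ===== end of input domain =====

-- B's main loop runs over the integer ASCII codes strictly between the bounds, multiplying each
-- code by a precomputed character frequency, instead of A's per-character test-and-add pass.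


-- ===== PORT A =====
-- Python's ord(s): exact for one-character strings (Pre_ requires exactly that); 0 otherwise (Python raises TypeError there).
def pyOrd (s : String) : Int :=
  match s.toList with
  | [c] => (c.toNat : Int)
  | _ => 0

def sum_ascii_between_chars (start_char : String) (end_char : String) (text : String) : Int :=
  let start_ascii := pyOrd start_char
  let end_ascii := pyOrd end_char
  text.toList.foldl (fun ascii_sum char =>
    let char_ascii : Int := (char.toNat : Int)
    if start_ascii < char_ascii ∧ char_ascii < end_ascii then ascii_sum + char_ascii else ascii_sum) 0

-- ===== PORT B =====
-- Python's chr(code): exact for 0 ≤ code < 0x110000 (the only codes B reaches on Dom inputs).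
def pyChr (code : Int) : Char := Char.ofNat code.toNat

def sum_ascii_between_chars_alt (start_char : String) (end_char : String) (text : String) : Int :=
  let start_ascii := pyOrd start_char
  let end_ascii := pyOrd end_char
  -- counts[ch] = counts.get(ch, 0) + 1
  let counts : PySem.Dict Char Int :=
    text.toList.foldl (fun d ch => d.insert ch (d.getD ch 0 + 1)) PySem.Dict.empty
  -- for code in range(start_ascii + 1, end_ascii): total += code * counts.get(chr(code), 0)
  (PySem.List.pyRange (start_ascii + 1) end_ascii 1).foldl
    (fun total code => total + code * counts.getD (pyChr code) 0) 0

-- ===== PRECONDITION & SPEC =====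
-- Pre_ excludes exactly the inputs where ord() raises TypeError: bounds that are not single characters.
def Pre_sum_ascii_between_chars (start_char : String) (end_char : String) (text : String) : Prop :=
  start_char.toList.length = 1 ∧ end_char.toList.length = 1
instance (start_char : String) (end_char : String) (text : String) : Decidable (Pre_sum_ascii_between_chars start_char end_char text) := by unfold Pre_sum_ascii_between_chars; infer_instance

def pvWitness_sum_ascii_between_chars : String × String × String := ("a", "z", "hello world")

def Spec_sum_ascii_between_chars (start_char : String) (end_char : String) (text : String) (out : Int) : Prop := out = sum_ascii_between_chars_alt start_char end_char text
instance (start_char : String) (end_char : String) (text : String) (out : Int) : Decidable (Spec_sum_ascii_between_chars start_char end_char text out) := by unfold Spec_sum_ascii_between_chars; infer_instance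

-- ===== CLAIM (what is proved, stated in full; the proofs are below) =====
def Claim_equal_sum_ascii_between_chars : Prop := ∀ (start_char : String) (end_char : String) (text : String), Dom_sum_ascii_between_chars start_char end_char text → Pre_sum_ascii_between_chars start_char end_char text → Spec_sum_ascii_between_chars start_char end_char text (sum_ascii_between_chars start_char end_char text)

-- ===== LEMMAS AND PROOFS =====

-- chr is exact on codes below the surrogate range
lemma toNat_pyChr (code : Int) (h0 : 0 ≤ code) (h1 : code < 55296) :
    ((pyChr code).toNat : Int) = code := by
  unfold pyChr
  rw [Char.toNat_ofNat]
  have hv : code.toNat.isValidChar := by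
    unfold Nat.isValidChar
    left; omega
  simp [hv]
  omega

-- summing 'if x = v then f x else 0' over a nodup Int list
lemma sum_map_ite_int (f : Int → Int) (v : Int) :
    ∀ d : List Int, d.Nodup →
      (d.map (fun x => if x = v then f x else 0)).sum = if v ∈ d then f v else 0 := by
  intro d
  induction d with
  | nil => intro _; simp
  | cons a t ih =>
    intro hd
    simp only [List.map_cons, List.sum_cons, ih (List.nodup_cons.mp hd).2]
    by_cases hav : a = v
    · subst hav
      have : a ∉ t := (List.nodup_cons.mp hd).1
      simp [this]
    · simp [hav, Ne.symm hav, List.mem_cons]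

-- the code-range sum with multiplicities equals the per-character sum
lemma range_count_sum (sa ea : Int) (hsa : 0 ≤ sa) (hea : ea ≤ 127) (xs : List Char) :
    ((PySem.List.pyRange (sa + 1) ea 1).map
        (fun code => code * (xs.count (pyChr code) : Int))).sum
      = (xs.map (fun c =>
          if sa < (c.toNat : Int) ∧ (c.toNat : Int) < ea then (c.toNat : Int) else 0)).sum := by
  induction xs with
  | nil => simp
  | cons c t ih =>
    have hcongr : ∀ code ∈ PySem.List.pyRange (sa + 1) ea 1,
        code * (((c :: t).count (pyChr code) : Nat) : Int)
          = code * (t.count (pyChr code) : Int)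
            + (if code = (c.toNat : Int) then code else 0) := by
      intro code hcode
      have hm := PySem.List.mem_pyRange_one.mp hcode
      have hiff : (pyChr code = c) ↔ code = (c.toNat : Int) := by
        constructor
        · intro h
          have := toNat_pyChr code (by omega) (by omega)
          rw [h] at this
          omega
        · intro h
          have hcv : code.toNat = c.toNat := by omega
          unfold pyChr
          rw [hcv, Char.ofNat_toNat]
      rw [List.count_cons]
      push_cast
      by_cases h : pyChr code = c
      · obtain rfl := hiff.mp h
        simp [h]; ring
      · have hne : ¬ code = (c.toNat : Int) := fun e => h (hiff.mpr e)
        have h2 : ¬ (c = pyChr code) := fun e => h e.symm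
        simp [h2, hne]
    calc ((PySem.List.pyRange (sa + 1) ea 1).map
            (fun code => code * ((c :: t).count (pyChr code) : Int))).sum
        = ((PySem.List.pyRange (sa + 1) ea 1).map
            (fun code => code * (t.count (pyChr code) : Int)
              + (if code = (c.toNat : Int) then code else 0))).sum := by
          exact congrArg List.sum (List.map_congr_left hcongr)
      _ = ((PySem.List.pyRange (sa + 1) ea 1).map
            (fun code => code * (t.count (pyChr code) : Int))).sum
          + ((PySem.List.pyRange (sa + 1) ea 1).map
            (fun code => if code = (c.toNat : Int) then code else 0)).sum := by
          rw [← List.sum_map_add]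
      _ = (t.map (fun c =>
            if sa < (c.toNat : Int) ∧ (c.toNat : Int) < ea then (c.toNat : Int) else 0)).sum
          + (if sa < (c.toNat : Int) ∧ (c.toNat : Int) < ea then (c.toNat : Int) else 0) := by
          rw [ih, sum_map_ite_int _ _ _ (PySem.List.nodup_pyRange_one (sa + 1) ea)]
          congr 1
          by_cases hm : (c.toNat : Int) ∈ PySem.List.pyRange (sa + 1) ea 1
          · have := PySem.List.mem_pyRange_one.mp hm
            simp [hm]
            omega
          · have : ¬ (sa < (c.toNat : Int) ∧ (c.toNat : Int) < ea) := by
              intro h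
              exact hm (PySem.List.mem_pyRange_one.mpr (by omega))
            simp [hm, this]
      _ = ((c :: t).map (fun c =>
            if sa < (c.toNat : Int) ∧ (c.toNat : Int) < ea then (c.toNat : Int) else 0)).sum := by
          simp [List.map_cons]; ring

-- ===== VERDICT (by name: the statement is the Claim_ definition above) =====
theorem sum_ascii_between_chars_spec : Claim_equal_sum_ascii_between_chars := by
  intro s e t hdom hpre
  unfold Spec_sum_ascii_between_chars sum_ascii_between_chars sum_ascii_between_chars_alt
  simp only []
  set sa := pyOrd s with hsa_def
  set ea := pyOrd e with hea_def
  set xs := t.toList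
  -- bounds on the ord values from Dom and Pre
  have hsa0 : 0 ≤ sa := by
    rw [hsa_def]; unfold pyOrd
    cases h : s.toList with
    | nil => simp
    | cons a l => cases l <;> simp
  have hea127 : ea ≤ 127 := by
    obtain ⟨ce, hce⟩ : ∃ c, e.toList = [c] := List.length_eq_one_iff.mp hpre.2
    have hdc : pvDomChar ce = true := by
      have : pvDomStr e = true := by
        unfold Dom_sum_ascii_between_chars at hdom
        simp at hdom
        exact hdom.1.2
      unfold pvDomStr at this
      rw [hce] at this
      simpa using this
    have : ce.toNat ≤ 126 := by
      unfold pvDomChar at hdc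
      simp at hdc
      omega
    rw [hea_def]
    unfold pyOrd
    rw [hce]
    simp
    omega
  -- A side: the fold is the sum of the per-character contributions
  have hA : xs.foldl (fun acc c =>
      if sa < (c.toNat : Int) ∧ (c.toNat : Int) < ea then acc + (c.toNat : Int) else acc) 0
      = (xs.map (fun c =>
          if sa < (c.toNat : Int) ∧ (c.toNat : Int) < ea then (c.toNat : Int) else 0)).sum := by
    have := PySem.List.foldl_congr_mem
      (f := fun acc c => if sa < (c.toNat : Int) ∧ (c.toNat : Int) < ea then acc + (c.toNat : Int) else acc)
      (g := fun acc c => acc + (if sa < (c.toNat : Int) ∧ (c.toNat : Int) < ea then (c.toNat : Int) else 0))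
      (l := xs) (init := (0 : Int))
      (by intro acc c _; by_cases h : sa < (c.toNat : Int) ∧ (c.toNat : Int) < ea <;> simp [h])
    rw [this, PySem.List.foldl_add]
    simp
  -- B side: the frequency dict is Counter(text); the code loop is a sum over the range
  have hB : (PySem.List.pyRange (sa + 1) ea 1).foldl
      (fun total code => total +
        code * (xs.foldl (fun d ch => d.insert ch (d.getD ch 0 + 1)) PySem.Dict.empty).getD (pyChr code) 0) 0
      = ((PySem.List.pyRange (sa + 1) ea 1).map
          (fun code => code * (xs.count (pyChr code) : Int))).sum := by
    simp only [PySem.Dict.foldl_insert_getD_add_one_eq_counter, PySem.Dict.getD_counter]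
    rw [PySem.List.foldl_add]
    simp
  rw [hA, hB, range_count_sum sa ea hsa0 hea127 xs]
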